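-- pv_equiv track=rewrite | github.com/AlifsyahRS/Alif-PythonExercises | Hapax_Exercise/hapax_legomenon.py | hapax_legomenon
-- ===== SOURCE A (Python) =====
-- import string as st
--
-- list_punctuation = list(st.punctuation)
--
-- list_digits = list(st.digits)
--
-- def hapax_legomenon(text):
--     word_counter = {}
--     hapax_counter = 0
--     listofwords = text.lower().split()
--     for word in listofwords:
--         for char in word:
--             if char in list_punctuation or char in list_digits:
--                 word = word.replace(char, '')
--         if word in word_counter:
--             word_counter[word] += 1
--         else:
--             word_counter[word] = 1
--     for i in word_counter:
--         if word_counter[i] == 1: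
--             hapax_counter += 1
--     return hapax_counter
-- ===== SOURCE B (Python) =====
-- import string as st
--
-- _bad = set(st.punctuation) | set(st.digits)
--
-- def hapax_legomenon(text):
--     words = sorted(''.join(c for c in w if c not in _bad) for w in text.lower().split())
--     hapax = 0
--     i = 0
--     n = len(words)
--     while i < n:
--         j = i + 1
--         while j < n and words[j] == words[i]:
--             j += 1
--         if j - i == 1:
--             hapax += 1
--         i = j
--     return hapax
-- ===== Notes on version B (the rewrite author's own statement) =====
-- stated objective: alternative
-- what changed: B replaces A's frequency dictionary (count into a dict, then scan keys for value 1) with a sort-then-adjacent-run scan, and cleans each word with a single filter pass instead of A's per-character str.replace calls that rebuild the word for every punctuation/digit character.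
import Mathlib
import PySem

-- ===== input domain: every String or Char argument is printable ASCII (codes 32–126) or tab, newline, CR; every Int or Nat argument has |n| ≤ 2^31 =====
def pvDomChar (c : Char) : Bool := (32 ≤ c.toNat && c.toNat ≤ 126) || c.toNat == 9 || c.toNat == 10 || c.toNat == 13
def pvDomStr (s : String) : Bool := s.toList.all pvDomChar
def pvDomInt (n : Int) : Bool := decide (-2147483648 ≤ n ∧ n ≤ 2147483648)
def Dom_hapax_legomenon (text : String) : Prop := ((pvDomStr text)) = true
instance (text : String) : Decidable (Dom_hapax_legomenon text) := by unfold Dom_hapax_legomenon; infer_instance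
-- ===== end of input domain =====

-- B replaces A's frequency dictionary with a sort-then-adjacent-run scan (alternative decomposition).

-- ===== PORT A =====
-- module constants: string.punctuation and string.digits as lists of characters
def list_punctuation : List Char := "!\"#$%&'()*+,-./:;<=>?@[\\]^_`{|}~".toList
def list_digits : List Char := "0123456789".toList

def hapax_legomenon (text : String) : Int :=
  let listofwords := PySem.Str.split₀ (PySem.Str.lower text)
  let word_counter := listofwords.foldl (fun d word0 =>
      -- 'for char in word' iterates the chars of the word as it was at loop entry
      let word := word0.toList.foldl (fun cur c =>
          if list_punctuation.contains c || list_digits.contains c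
          then PySem.Str.replace cur (String.ofList [c]) "" else cur) word0
      if d.contains word then d.insert word (d.getD word 0 + 1) else d.insert word 1)
    (PySem.Dict.empty : PySem.Dict String Int)
  -- 'for i in word_counter' iterates the keys; word_counter[i] is always present, so getD is exact
  word_counter.keys.foldl (fun acc k => if word_counter.getD k 0 == 1 then acc + 1 else acc) (0 : Int)

-- ===== PORT B =====
-- _bad = set(st.punctuation) | set(st.digits)
def badSet : PySem.Set Char := PySem.Set.union (PySem.Set.ofList list_punctuation) list_digits

-- the inner while loop measures the run of words equal to words[i]; the outer loop jumps run by run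
def countRuns1 : List String → Int
  | [] => 0
  | x :: xs =>
    let k := (xs.takeWhile (fun y => y == x)).length
    (if k = 0 then 1 else 0) + countRuns1 (xs.drop k)
termination_by l => l.length
decreasing_by simp [List.length_drop]

def hapax_legomenon_alt (text : String) : Int :=
  let words := PySem.List.sorted
    ((PySem.Str.split₀ (PySem.Str.lower text)).map
      (fun w => String.ofList (w.toList.filter (fun c => !(PySem.Set.contains badSet c)))))
    (fun x => x) false
  countRuns1 words

-- ===== PRECONDITION & SPEC =====
def Spec_hapax_legomenon (text : String) (out : Int) : Prop := out = hapax_legomenon_alt text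
instance (text : String) (out : Int) : Decidable (Spec_hapax_legomenon text out) := by unfold Spec_hapax_legomenon; infer_instance

-- ===== CLAIM (what is proved, stated in full; the proofs are below) =====
def Claim_equal_hapax_legomenon : Prop := ∀ (text : String), Dom_hapax_legomenon text → Spec_hapax_legomenon text (hapax_legomenon text)

-- ===== LEMMAS AND PROOFS =====

-- the bad-character predicate both versions test
def badC (c : Char) : Bool := list_punctuation.contains c || list_digits.contains c

set_option maxRecDepth 4000 in
lemma badSet_eq : badSet = list_punctuation ++ list_digits := by decide

-- str.replace with a one-char pattern and empty replacement is a filter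
lemma replace_go_singleton (c : Char) :
    ∀ (l : List Char) (fuel : Nat) (acc : List Char), l.length ≤ fuel →
      PySem.Chars.replace.go [c] [] fuel l acc = acc.reverse ++ l.filter (fun a => !(a == c)) := by
  intro l
  induction l with
  | nil => intro fuel acc _; cases fuel <;> simp [PySem.Chars.replace.go]
  | cons x t ih =>
    intro fuel acc hlen
    cases fuel with
    | zero => simp at hlen
    | succ n =>
      have ht : t.length ≤ n := by simpa using hlen
      by_cases hx : c = x
      · subst hx
        simp [PySem.Chars.replace.go, List.isPrefixOf, ih n acc ht]
      · have hp : ([c].isPrefixOf (x :: t)) = false := by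
          simp [List.isPrefixOf, hx]
        simp [PySem.Chars.replace.go, hp, ih n (x :: acc) ht, Ne.symm hx]

lemma replace_singleton (cs : List Char) (c : Char) :
    PySem.Chars.replace cs [c] [] = cs.filter (fun a => !(a == c)) := by
  have := replace_go_singleton c cs cs.length [] le_rfl
  simpa [PySem.Chars.replace] using this

-- A's per-word char loop deletes exactly the bad characters
lemma clean_loop (l : List Char) :
    ∀ (cs : List Char), (∀ c ∈ cs, badC c = true → c ∈ l) →
      l.foldl (fun cur c => if badC c then cur.filter (fun a => !(a == c)) else cur) cs
        = cs.filter (fun c => !badC c) := by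
  induction l with
  | nil =>
    intro cs h
    simp only [List.foldl_nil]
    rw [List.filter_eq_self.mpr]
    intro c hc
    by_contra hb
    simp only [Bool.not_eq_eq_eq_not, Bool.not_true] at hb
    have : badC c = true := by simpa using hb
    exact absurd (h c hc this) List.not_mem_nil
  | cons x t ih =>
    intro cs h
    rw [List.foldl_cons]
    by_cases hx : badC x = true
    · rw [if_pos hx]
      rw [ih (cs.filter (fun a => !(a == x)))
        (by
          intro c hc hb
          rw [List.mem_filter] at hc
          rcases List.mem_cons.mp (h c hc.1 hb) with h1 | h1
          · exact absurd hc.2 (by simp [h1])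
          · exact h1)]
      rw [List.filter_filter]
      apply List.filter_congr
      intro c _
      by_cases hb : badC c = true
      · simp [hb]
      · have hne : c ≠ x := by rintro rfl; exact hb hx
        simp [hb, hne]
    · rw [if_neg hx]
      apply ih
      intro c hc hb
      rcases List.mem_cons.mp (h c hc hb) with h1 | h1
      · exact absurd (h1 ▸ hb) hx
      · exact h1

-- A's cleaned word equals B's cleaned word
lemma clean_word (w : String) :
    w.toList.foldl (fun cur c =>
        if list_punctuation.contains c || list_digits.contains c
        then PySem.Str.replace cur (String.ofList [c]) "" else cur) w
      = String.ofList (w.toList.filter (fun c => !(PySem.Set.contains badSet c))) := by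
  have hstep : ∀ (l : List Char) (s : String),
      (l.foldl (fun cur c =>
        if list_punctuation.contains c || list_digits.contains c
        then PySem.Str.replace cur (String.ofList [c]) "" else cur) s).toList
      = l.foldl (fun cur c => if badC c then cur.filter (fun a => !(a == c)) else cur) s.toList := by
    intro l
    induction l with
    | nil => intro s; simp
    | cons x t ih =>
      intro s
      rw [List.foldl_cons, List.foldl_cons]
      by_cases hx : badC x = true
      · rw [if_pos hx, if_pos (show (list_punctuation.contains x || list_digits.contains x) = true from hx), ih]
        congr 1
        rw [PySem.Str.toList_replace]
        simpa using replace_singleton s.toList x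
      · rw [if_neg hx, if_neg (show ¬((list_punctuation.contains x || list_digits.contains x) = true) from hx), ih]
  apply String.toList_injective
  rw [hstep w.toList w, clean_loop w.toList w.toList (fun c hc _ => hc)]
  rw [String.toList_ofList]
  apply List.filter_congr
  intro c _
  simp [badSet_eq, PySem.Set.contains, badC]

-- the cleaned word list, in B's form
def cleanedWords (text : String) : List String :=
  (PySem.Str.split₀ (PySem.Str.lower text)).map
    (fun w => String.ofList (w.toList.filter (fun c => !(PySem.Set.contains badSet c))))

-- A's 'if word in counter' update is the standard counting fold
lemma step_collapse (d : PySem.Dict String Int) (w : String) :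
    (if d.contains w then d.insert w (d.getD w 0 + 1) else d.insert w 1)
      = d.insert w (d.getD w 0 + 1) := by
  by_cases h : d.contains w
  · rw [if_pos h]
  · rw [if_neg h]
    have hg : d.getD w 0 = 0 := by
      unfold PySem.Dict.getD
      have hn : d.get? w = none := by
        rw [← Option.not_isSome_iff_eq_none, ← PySem.Dict.contains_eq_isSome_get?]
        simpa using h
      rw [hn]
      rfl
    rw [hg]
    norm_num

-- counting the count-1 words once each (over the distinct words) = counting them in the list
lemma countP_dedup_count_one (l : List String) :
    (PySem.Set.ofList l).countP (fun w => l.count w == 1)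
      = l.countP (fun w => l.count w == 1) := by
  rw [List.countP_eq_length_filter, List.countP_eq_length_filter]
  apply List.Perm.length_eq
  rw [List.perm_ext_iff_of_nodup]
  · intro a
    simp only [List.mem_filter, PySem.Set.mem_ofList]
  · exact (PySem.Set.nodup_ofList l).filter _
  · rw [List.nodup_iff_count_le_one]
    intro a
    by_cases h : (l.count a == 1) = true
    · rw [List.count_filter (p := fun w => l.count w == 1) h]
      simp only [beq_iff_eq] at h
      omega
    · have hnm : a ∉ l.filter (fun w => l.count w == 1) := by
        intro hm
        exact h ((List.mem_filter.mp hm).2)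
      rw [List.count_eq_zero.mpr hnm]
      omega

-- A equals the hapax count over the cleaned word list
lemma A_eq_countP (text : String) :
    hapax_legomenon text
      = ((cleanedWords text).countP (fun w => (cleanedWords text).count w == 1) : Int) := by
  unfold hapax_legomenon
  simp only [clean_word, step_collapse]
  rw [show (List.foldl
        (fun (d : PySem.Dict String Int) word0 =>
          d.insert (String.ofList (word0.toList.filter (fun c => !(PySem.Set.contains badSet c))))
            (d.getD (String.ofList (word0.toList.filter (fun c => !(PySem.Set.contains badSet c)))) 0 + 1))
        PySem.Dict.empty (PySem.Str.split₀ (PySem.Str.lower text)))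
      = (cleanedWords text).foldl (fun d w => d.insert w (d.getD w 0 + 1)) PySem.Dict.empty from
    (List.foldl_map (f := fun w => String.ofList (w.toList.filter (fun c => !(PySem.Set.contains badSet c))))
      (g := fun (d : PySem.Dict String Int) w => d.insert w (d.getD w 0 + 1))
      (l := PySem.Str.split₀ (PySem.Str.lower text)) (init := PySem.Dict.empty)).symm]
  rw [PySem.Dict.foldl_insert_getD_add_one_eq_counter]
  rw [PySem.List.foldl_if_add_one]
  rw [PySem.Dict.keys_counter]
  have hcast : ∀ (n : Nat), (((n : Int)) == 1) = (n == 1) := by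
    intro n
    by_cases h : n = 1
    · subst h; rfl
    · have h2 : ¬((n : Int) = 1) := by exact_mod_cast h
      simp [h, h2]
  have hq : (PySem.Set.ofList (cleanedWords text)).countP
        (fun k => (PySem.Dict.counter (cleanedWords text)).getD k 0 == 1)
      = (PySem.Set.ofList (cleanedWords text)).countP
        (fun k => (cleanedWords text).count k == 1) := by
    apply List.countP_congr
    intro a _
    rw [PySem.Dict.getD_counter, hcast]
  rw [hq, countP_dedup_count_one]
  exact Int.zero_add _

-- x never occurs after its run in a sorted list
lemma notmem_dropWhile (x : String) :
    ∀ (xs : List String), (∀ y ∈ xs, x ≤ y) → xs.Pairwise (· ≤ ·) →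
      x ∉ xs.dropWhile (fun y => y == x) := by
  intro xs
  induction xs with
  | nil => intro _ _; simp
  | cons y ys ih =>
    intro hle hp
    by_cases hy : (y == x) = true
    · rw [List.dropWhile_cons_of_pos (p := fun y => y == x) hy]
      exact ih (fun z hz => hle z (List.mem_cons_of_mem _ hz))
        (List.Pairwise.sublist (List.sublist_cons_self y ys) hp)
    · rw [List.dropWhile_cons_of_neg (p := fun y => y == x) hy]
      intro hm
      rcases List.mem_cons.mp hm with h1 | h1
      · exact hy (by simp [h1])
      · have hyx : y ≤ x := (List.pairwise_cons.mp hp).1 x h1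
        have hxy : x ≤ y := hle y List.mem_cons_self
        exact hy (by simp [le_antisymm hxy hyx])

-- the run scan over a sorted list counts exactly the count-1 elements
lemma countRuns1_sorted :
    ∀ (l : List String), l.Pairwise (· ≤ ·) →
      countRuns1 l = (l.countP (fun w => l.count w == 1) : Int) := by
  intro l
  induction l using countRuns1.induct with
  | case1 => intro _; simp [countRuns1]
  | case2 x xs k ih =>
    intro hp
    rw [countRuns1]
    set run := xs.takeWhile (fun y => y == x) with hrun
    set rest := xs.dropWhile (fun y => y == x) with hrest
    have hxs : run ++ rest = xs := List.takeWhile_append_dropWhile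
    have hdrop : xs.drop run.length = rest := by
      conv_lhs => rw [← hxs]
      exact List.drop_left
    have hrunx : ∀ y ∈ run, y = x := by
      intro y hy
      have := List.mem_takeWhile_imp (hrun ▸ hy)
      simpa using this
    have hle : ∀ y ∈ xs, x ≤ y := (List.pairwise_cons.mp hp).1
    have hpxs : xs.Pairwise (· ≤ ·) := (List.pairwise_cons.mp hp).2
    have hxnr : x ∉ rest := notmem_dropWhile x xs hle hpxs
    have hprest : rest.Pairwise (· ≤ ·) := by
      rw [← hdrop]
      exact List.Pairwise.sublist (List.drop_sublist _ _) hpxs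
    have hcx : (x :: xs).count x = run.length + 1 := by
      rw [← hxs, List.count_cons_self, List.count_append,
        List.count_eq_length.mpr (fun b hb => (hrunx b hb).symm),
        List.count_eq_zero.mpr hxnr]
    have hcy : ∀ y ∈ rest, (x :: xs).count y = rest.count y := by
      intro y hy
      have hyx : y ≠ x := fun h => hxnr (h ▸ hy)
      have hnotrun : y ∉ run := fun hm => hyx (hrunx y hm)
      conv_lhs => rw [← hxs]
      simp [List.count_append, Ne.symm hyx, List.count_eq_zero.mpr hnotrun]
    have hdecomp : ∀ (q : String → Bool),
        (x :: xs).countP q = run.countP q + rest.countP q + (if q x = true then 1 else 0) := by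
      intro q
      conv_lhs => rw [← hxs]
      rw [List.countP_cons, List.countP_append]
    have hcrest : rest.countP (fun w => (x :: xs).count w == 1)
        = rest.countP (fun w => rest.count w == 1) :=
      List.countP_congr (fun a ha => by rw [hcy a ha])
    rw [hdrop] at ih ⊢
    rw [ih hprest, hdecomp, hcrest]
    by_cases hk : run.length = 0
    · have hre : run = [] := List.length_eq_zero_iff.mp hk
      have hpx : ((x :: xs).count x == 1) = true := by rw [hcx, hk]; rfl
      rw [hre, hpx]
      norm_num
      ring
    · have hpx : ((x :: xs).count x == 1) = false := by
        rw [hcx]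
        simp only [beq_eq_false_iff_ne, ne_eq]
        omega
      have hcr : run.countP (fun w => (x :: xs).count w == 1) = 0 := by
        rw [List.countP_eq_zero]
        intro a ha
        rw [hrunx a ha, hpx]
        simp
      rw [hcr, hpx, if_neg hk]
      push_cast
      ring

-- ===== VERDICT (by name: the statement is the Claim_ definition above) =====
theorem hapax_legomenon_spec : Claim_equal_hapax_legomenon := by
  intro text _
  unfold Spec_hapax_legomenon
  have halt : hapax_legomenon_alt text
      = countRuns1 (PySem.List.sorted (cleanedWords text) (fun x => x) false) := by
    unfold hapax_legomenon_alt cleanedWords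
    rfl
  have hperm : (PySem.List.sorted (cleanedWords text) (fun x => x) false).Perm (cleanedWords text) :=
    PySem.List.sorted_perm _ _ _
  have hpw : (PySem.List.sorted (cleanedWords text) (fun x => x) false).Pairwise (· ≤ ·) := by
    simpa using PySem.List.sorted_pairwise (cleanedWords text) (fun x => x)
  have hcountp : (PySem.List.sorted (cleanedWords text) (fun x => x) false).countP
        (fun w => (PySem.List.sorted (cleanedWords text) (fun x => x) false).count w == 1)
      = (cleanedWords text).countP (fun w => (cleanedWords text).count w == 1) := by
    calc (PySem.List.sorted (cleanedWords text) (fun x => x) false).countP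
          (fun w => (PySem.List.sorted (cleanedWords text) (fun x => x) false).count w == 1)
        = (PySem.List.sorted (cleanedWords text) (fun x => x) false).countP
          (fun w => (cleanedWords text).count w == 1) :=
          List.countP_congr (fun a _ => by rw [hperm.count_eq])
      _ = (cleanedWords text).countP (fun w => (cleanedWords text).count w == 1) :=
          hperm.countP_eq _
  rw [halt, countRuns1_sorted _ hpw, hcountp, A_eq_countP]
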